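-- pv_equiv track=rewrite | github.com/emersonfelipesp/netbox-sdk | netbox_sdk/django_models/fetcher.py | _match_tag
-- ===== SOURCE A (Python) =====
-- def _match_tag(api_version: str, tags: list[str]) -> str | None:
--     """Find the best build tag matching an API-Version value.
--
--     ``api_version`` is e.g. ``"4.2"``; tags are e.g. ``["v4.5.5", "v4.2.1"]``.
--     """
--     prefix = f"v{api_version}."
--     for t in tags:
--         if t.startswith(prefix):
--             return t
--     major = api_version.split(".")[0]
--     major_prefix = f"v{major}."
--     for t in tags:
--         if t.startswith(major_prefix):
--             return t
--     return None
-- ===== SOURCE B (Python) =====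
-- from functools import reduce
--
-- def _match_tag(api_version: str, tags: list[str]) -> str | None:
--     """One fold over tags accumulating a pair (first exact match, first
--     major-version match); the answer is exact or fallback."""
--     prefix = f"v{api_version}."
--     major_prefix = f"v{api_version.split('.')[0]}."
--
--     def step(acc, t):
--         exact, fallback = acc
--         return (
--             t if exact is None and t.startswith(prefix) else exact,
--             t if fallback is None and t.startswith(major_prefix) else fallback,
--         )
--
--     exact, fallback = reduce(step, tags, (None, None))
--     return exact if exact is not None else fallback
-- ===== Notes on version B (the rewrite author's own statement) =====
-- stated objective: alternative
-- what changed: Replaced A's two sequential early-return scans with a single fold (functools.reduce) over tags that accumulates a pair (first exact-prefix match, first major-prefix match) with no early return, then selects exact or fallback.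
import Mathlib
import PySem

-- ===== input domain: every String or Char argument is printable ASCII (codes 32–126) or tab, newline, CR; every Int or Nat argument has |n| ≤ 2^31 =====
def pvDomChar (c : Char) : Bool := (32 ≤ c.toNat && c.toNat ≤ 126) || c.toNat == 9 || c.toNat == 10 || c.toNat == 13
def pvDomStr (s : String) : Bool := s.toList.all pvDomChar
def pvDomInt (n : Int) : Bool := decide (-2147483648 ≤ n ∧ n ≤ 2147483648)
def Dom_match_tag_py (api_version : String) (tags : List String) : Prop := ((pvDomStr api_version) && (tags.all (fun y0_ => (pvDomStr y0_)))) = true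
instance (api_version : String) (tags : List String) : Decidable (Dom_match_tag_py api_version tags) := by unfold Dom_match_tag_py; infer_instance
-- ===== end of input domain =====

-- B replaces A's two sequential early-return scans by one fold accumulating a pair (first exact match, first major match) (objective: alternative decomposition, same cost).

-- ===== PORT A =====
-- a for-loop of A: return the first tag starting with the given pfx
def matchTagScan (pfx : String) (tags : List String) : Option String :=
  match tags with
  | [] => none
  | t :: rest => if PySem.Str.startswith t pfx then some t else matchTagScan pfx rest

def match_tag_py (api_version : String) (tags : List String) : Option String :=
  let pfx := "v" ++ api_version ++ "."
  match matchTagScan pfx tags with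
  | some t => some t
  | none =>
    -- api_version.split(".")[0]: split? with a nonempty separator always returns a nonempty list, so [0] is its head
    let major := ((PySem.Str.split? api_version ".").getD []).headD ""
    let major_prefix := "v" ++ major ++ "."
    matchTagScan major_prefix tags

-- ===== PORT B =====
-- B's step function: update the (exact, fallback) pair with one tag
def matchTagStep (pfx major_prefix : String) (acc : Option String × Option String)
    (t : String) : Option String × Option String :=
  (if acc.1.isNone && PySem.Str.startswith t pfx then some t else acc.1,
   if acc.2.isNone && PySem.Str.startswith t major_prefix then some t else acc.2)

def match_tag_py_alt (api_version : String) (tags : List String) : Option String :=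
  let pfx := "v" ++ api_version ++ "."
  let major_prefix := "v" ++ ((PySem.Str.split? api_version ".").getD []).headD "" ++ "."
  let acc := tags.foldl (matchTagStep pfx major_prefix) (none, none)
  match acc.1 with
  | some e => some e
  | none => acc.2

-- ===== PRECONDITION & SPEC =====
def Spec_match_tag_py (api_version : String) (tags : List String) (out : Option String) : Prop := out = match_tag_py_alt api_version tags
instance (api_version : String) (tags : List String) (out : Option String) : Decidable (Spec_match_tag_py api_version tags out) := by unfold Spec_match_tag_py; infer_instance

-- ===== CLAIM (what is proved, stated in full; the proofs are below) =====
def Claim_equal_match_tag_py : Prop := ∀ (api_version : String) (tags : List String), Dom_match_tag_py api_version tags → Spec_match_tag_py api_version tags (match_tag_py api_version tags)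

-- ===== LEMMAS AND PROOFS =====
-- Fold invariant: each component of the fold is "the incoming value if set, else the first scan match".
theorem foldl_matchTagStep (pfx major_prefix : String) (e f : Option String)
    (tags : List String) :
    tags.foldl (matchTagStep pfx major_prefix) (e, f) =
      ((match e with | some x => some x | none => matchTagScan pfx tags),
       (match f with | some x => some x | none => matchTagScan major_prefix tags)) := by
  induction tags generalizing e f with
  | nil => cases e <;> cases f <;> simp [matchTagScan]
  | cons t rest ih =>
    simp only [List.foldl_cons, matchTagStep, ih]
    cases e <;> cases f <;>
      by_cases hp : PySem.Chars.startswith t.toList pfx.toList <;>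
      by_cases hm : PySem.Chars.startswith t.toList major_prefix.toList <;>
      simp [matchTagScan, PySem.Str.startswith, hp, hm]

-- ===== VERDICT (by name: the statement is the Claim_ definition above) =====
theorem match_tag_py_spec : Claim_equal_match_tag_py := by
  intro api_version tags _
  unfold Spec_match_tag_py match_tag_py match_tag_py_alt
  simp only [foldl_matchTagStep]
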